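-- pv_equiv track=rewrite | github.com/KirlosYousef/Advent-of-Code-2019 | AOC-Day6/OrbitMap.py | search
-- ===== SOURCE A (Python) =====
-- def search(orbits, planet, w_count):
--     return_val = 0
--
--     for prev in orbits:
--
--         current_count = w_count
--         prev_first = prev[0]
--         prev_second = prev[1]
--
--         if planet == prev_second:
--             if prev_first != 'COM':
--                 current_count += 1
--                 return_val = search(orbits, prev_first, current_count)
--             else:
--                 current_count += 1
--                 return_val = current_count
--
--     return return_val
-- ===== SOURCE B (Python) =====
-- def search(orbits, planet, w_count):
--     count = w_count
--     current = planet
--     while True: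
--         parent = None
--         for prev in orbits:
--             if current == prev[1]:
--                 parent = prev[0]
--         if parent is None:
--             return 0
--         count += 1
--         if parent == 'COM':
--             return count
--         current = parent
-- ===== Notes on version B (the rewrite author's own statement) =====
-- stated objective: alternative
-- what changed: Replaced A's recursion that re-calls search for every matching row (keeping only the last result) with an iterative loop that, per level, scans once for the last matching parent and follows only that chain.
import Mathlib
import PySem

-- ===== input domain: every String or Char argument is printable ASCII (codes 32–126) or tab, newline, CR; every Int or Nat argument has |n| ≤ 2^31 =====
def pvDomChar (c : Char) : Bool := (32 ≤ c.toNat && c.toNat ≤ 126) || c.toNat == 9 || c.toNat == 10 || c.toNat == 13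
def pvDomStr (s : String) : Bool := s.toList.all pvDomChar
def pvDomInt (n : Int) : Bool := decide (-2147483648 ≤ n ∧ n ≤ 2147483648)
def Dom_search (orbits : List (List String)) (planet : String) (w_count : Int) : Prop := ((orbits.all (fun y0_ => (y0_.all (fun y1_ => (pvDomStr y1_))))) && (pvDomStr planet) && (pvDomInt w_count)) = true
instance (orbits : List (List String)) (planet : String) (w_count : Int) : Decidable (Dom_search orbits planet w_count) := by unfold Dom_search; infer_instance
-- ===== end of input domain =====

-- B replaces A's per-matching-row recursion (last result kept) by an iterative chase of the
-- last matching parent only; objective: alternative (same value, one chain followed instead of all).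
-- ===== PORT A =====
-- Python A recurses; fuel = orbits.length + 1 bounds the depth (sufficient whenever Python A
-- terminates: a longer parent chain from planet would repeat a node, i.e. a reachable cycle,
-- on which Python A raises RecursionError and which Pre_search excludes).
def searchFuel (fuel : Nat) (orbits : List (List String)) (planet : String) (w_count : Int) : Int :=
  match fuel with
  | 0 => 0
  | Nat.succ f =>
    orbits.foldl (fun return_val prev =>
      let current_count := w_count
      let prev_first := (PySem.List.pyGet? prev 0).getD ""
      let prev_second := (PySem.List.pyGet? prev 1).getD ""
      if planet == prev_second then
        if prev_first != "COM" then
          searchFuel f orbits prev_first (current_count + 1)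
        else
          current_count + 1
      else return_val) 0

def search (orbits : List (List String)) (planet : String) (w_count : Int) : Int :=
  searchFuel (orbits.length + 1) orbits planet w_count

-- ===== PORT B =====
-- inner for-loop of Source B: last row whose second entry equals current, keeping its first entry
def lastParent (orbits : List (List String)) (current : String) : Option String :=
  orbits.foldl (fun parent prev =>
    if current == (PySem.List.pyGet? prev 1).getD "" then some ((PySem.List.pyGet? prev 0).getD "")
    else parent) none

-- Source B's while-loop; same fuel bound makes it total (the loop leaves Pre_search's chain anyway)
def searchLoop (fuel : Nat) (orbits : List (List String)) (current : String) (count : Int) : Int :=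
  match fuel with
  | 0 => 0
  | Nat.succ f =>
    match lastParent orbits current with
    | none => 0
    | some parent =>
      if parent == "COM" then count + 1
      else searchLoop f orbits parent (count + 1)

def search_alt (orbits : List (List String)) (planet : String) (w_count : Int) : Int :=
  searchLoop (orbits.length + 1) orbits planet w_count

-- ===== PRECONDITION & SPEC =====
-- one parent-step of A's recursion, deduplicated (all rows matching a frontier node, parent ≠ COM)
def parentsStep (orbits : List (List String)) (s : List String) : List String :=
  (orbits.filterMap (fun row =>
    if (PySem.List.pyGet? row 1).getD "" ∈ s ∧ (PySem.List.pyGet? row 0).getD "" ≠ "COM"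
    then some ((PySem.List.pyGet? row 0).getD "") else none)).dedup

def pvFrontier (orbits : List (List String)) (planet : String) : Nat → List String
  | 0 => [planet]
  | Nat.succ k => parentsStep orbits (pvFrontier orbits planet k)

-- Pre_search excludes exactly the inputs where Python A raises: a row with fewer than two
-- entries (IndexError on prev[0]/prev[1]) or a child→parent cycle reachable from planet
-- (unbounded recursion, RecursionError); the frontier emptying within length+1 steps is
-- equivalent to no reachable cycle, since a longer parent walk must repeat a node.
def Pre_search (orbits : List (List String)) (planet : String) (w_count : Int) : Prop :=
  (∀ row ∈ orbits, 2 ≤ row.length) ∧ pvFrontier orbits planet (orbits.length + 1) = []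

instance (orbits : List (List String)) (planet : String) (w_count : Int) : Decidable (Pre_search orbits planet w_count) := by
  unfold Pre_search; infer_instance

def pvWitness_search : List (List String) × String × Int := ([["COM", "B"], ["B", "C"]], "C", 0)

def Spec_search (orbits : List (List String)) (planet : String) (w_count : Int) (out : Int) : Prop := out = search_alt orbits planet w_count
instance (orbits : List (List String)) (planet : String) (w_count : Int) (out : Int) : Decidable (Spec_search orbits planet w_count out) := by unfold Spec_search; infer_instance

-- ===== CLAIM (what is proved, stated in full; the proofs are below) =====
def Claim_equal_search : Prop := ∀ (orbits : List (List String)) (planet : String) (w_count : Int), Dom_search orbits planet w_count → Pre_search orbits planet w_count → Spec_search orbits planet w_count (search orbits planet w_count)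

-- ===== LEMMAS AND PROOFS =====

-- A's fold over a tail l, where the accumulator already holds the value determined by the
-- last match seen so far (encoded as an Option String), equals the value determined by the
-- last match of the whole prefix+tail: both folds keep only the last matching row.
lemma foldl_last (f : Nat) (orbits : List (List String)) (planet : String) (c : Int) :
    ∀ (l : List (List String)) (p : Option String),
    l.foldl (fun return_val prev =>
        if planet == (PySem.List.pyGet? prev 1).getD "" then
          if (PySem.List.pyGet? prev 0).getD "" != "COM" then
            searchFuel f orbits ((PySem.List.pyGet? prev 0).getD "") (c + 1)
          else c + 1
        else return_val)
      (match p with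
        | none => 0
        | some q => if q != "COM" then searchFuel f orbits q (c + 1) else c + 1)
    =
    (match l.foldl (fun parent prev =>
        if planet == (PySem.List.pyGet? prev 1).getD "" then some ((PySem.List.pyGet? prev 0).getD "")
        else parent) p with
      | none => 0
      | some q => if q != "COM" then searchFuel f orbits q (c + 1) else c + 1) := by
  intro l
  induction l with
  | nil => intro p; rfl
  | cons prev rest ih =>
    intro p
    simp only [List.foldl_cons]
    by_cases h : planet == (PySem.List.pyGet? prev 1).getD ""
    · simp only [h, if_true]
      exact ih (some ((PySem.List.pyGet? prev 0).getD ""))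
    · simp only [h, Bool.false_eq_true, if_false]
      exact ih p

lemma searchFuel_eq_searchLoop (fuel : Nat) :
    ∀ (orbits : List (List String)) (planet : String) (c : Int),
    searchFuel fuel orbits planet c = searchLoop fuel orbits planet c := by
  induction fuel with
  | zero => intro orbits planet c; rfl
  | succ f ih =>
    intro orbits planet c
    have hA : searchFuel (Nat.succ f) orbits planet c
        = (match lastParent orbits planet with
            | none => 0
            | some q => if q != "COM" then searchFuel f orbits q (c + 1) else c + 1) := by
      have := foldl_last f orbits planet c orbits none
      simpa [searchFuel, lastParent] using this
    rw [hA]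
    show (match lastParent orbits planet with
            | none => 0
            | some q => if q != "COM" then searchFuel f orbits q (c + 1) else c + 1)
        = searchLoop (Nat.succ f) orbits planet c
    simp only [searchLoop]
    cases lastParent orbits planet with
    | none => rfl
    | some q =>
      by_cases hq : q == "COM"
      · simp [bne, hq]
      · simp [bne, hq, ih]

-- ===== VERDICT (by name: the statement is the Claim_ definition above) =====
theorem search_spec : Claim_equal_search := by
  intro orbits planet w_count _ _
  show search orbits planet w_count = search_alt orbits planet w_count
  exact searchFuel_eq_searchLoop (orbits.length + 1) orbits planet w_count
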